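-- pv_equiv track=rewrite | github.com/uwblueprint/llsc | backend/app/services/implementations/matching_service.py | _check_ethnic_group_overlap
-- ===== SOURCE A (Python) =====
-- def _check_ethnic_group_overlap(participant_ethnic_groups, volunteer_ethnic_groups) -> bool:
--     """Check if there's at least one overlapping ethnic group between participant and volunteer."""
--     if not participant_ethnic_groups or not volunteer_ethnic_groups:
--         return False
--
--     # Normalize to lists
--     participant_list = (
--         participant_ethnic_groups if isinstance(participant_ethnic_groups, list) else [participant_ethnic_groups]
--     )
--     volunteer_list = (
--         volunteer_ethnic_groups if isinstance(volunteer_ethnic_groups, list) else [volunteer_ethnic_groups]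
--     )
--
--     # Convert to sets for efficient intersection check
--     participant_set = {str(g).strip().lower() for g in participant_list if g}
--     volunteer_set = {str(g).strip().lower() for g in volunteer_list if g}
--
--     # Check if there's at least one overlap
--     return len(participant_set & volunteer_set) > 0
-- ===== SOURCE B (Python) =====
-- def _normalized_sorted(groups):
--     """Wrap a non-list value, drop falsy entries, normalize, and sort."""
--     lst = groups if isinstance(groups, list) else [groups]
--     return sorted(str(g).strip().lower() for g in lst if g)
--
--
-- def _check_ethnic_group_overlap(participant_ethnic_groups, volunteer_ethnic_groups) -> bool:
--     """Check if there's at least one overlapping ethnic group between participant and volunteer."""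
--     if not participant_ethnic_groups or not volunteer_ethnic_groups:
--         return False
--
--     # Sort-then-merge: a common normalized name exists iff the two-pointer
--     # merge scan of the two sorted lists ever sees equal heads.  No sets built.
--     ps = _normalized_sorted(participant_ethnic_groups)
--     vs = _normalized_sorted(volunteer_ethnic_groups)
--     i = j = 0
--     while i < len(ps) and j < len(vs):
--         if ps[i] == vs[j]:
--             return True
--         if ps[i] < vs[j]:
--             i += 1
--         else:
--             j += 1
--     return False
-- ===== Notes on version B (the rewrite author's own statement) =====
-- stated objective: alternative
-- what changed: B replaces the two hash sets and their intersection with sort-then-merge: both normalized lists are sorted and a two-pointer merge scan detects a common element with early exit, so no set is ever built.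
import Mathlib
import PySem

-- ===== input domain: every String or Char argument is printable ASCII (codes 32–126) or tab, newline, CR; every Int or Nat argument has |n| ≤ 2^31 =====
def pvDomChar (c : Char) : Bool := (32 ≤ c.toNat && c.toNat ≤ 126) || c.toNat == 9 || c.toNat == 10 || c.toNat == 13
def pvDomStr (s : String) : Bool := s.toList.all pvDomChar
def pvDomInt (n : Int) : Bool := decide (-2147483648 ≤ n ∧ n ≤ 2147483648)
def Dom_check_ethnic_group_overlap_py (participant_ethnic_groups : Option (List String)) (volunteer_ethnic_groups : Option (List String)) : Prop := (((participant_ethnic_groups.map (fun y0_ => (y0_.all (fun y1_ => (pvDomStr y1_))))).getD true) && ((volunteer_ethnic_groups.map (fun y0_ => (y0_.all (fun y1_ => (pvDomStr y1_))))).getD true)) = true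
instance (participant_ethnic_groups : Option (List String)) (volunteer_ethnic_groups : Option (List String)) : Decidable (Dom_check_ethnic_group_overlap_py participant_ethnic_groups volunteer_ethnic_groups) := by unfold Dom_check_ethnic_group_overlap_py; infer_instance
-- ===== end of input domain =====

-- B replaces the two hash sets and their intersection with sort-then-merge:
-- both normalized lists are sorted and a two-pointer scan detects a common
-- element (alternative algorithm, not claimed faster).

-- str(g).strip().lower() for a string g
def pvNorm (g : String) : String := PySem.Str.lower (PySem.Str.strip g)

-- ===== PORT A =====
def check_ethnic_group_overlap_py (participant_ethnic_groups : Option (List String)) (volunteer_ethnic_groups : Option (List String)) : Bool :=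
  -- 'if not participant_ethnic_groups or not volunteer_ethnic_groups: return False'
  if (participant_ethnic_groups.getD []).isEmpty || (volunteer_ethnic_groups.getD []).isEmpty then
    false
  else
    -- under the type convention both arguments are already lists, so the
    -- isinstance normalization keeps them as-is
    let participant_list := participant_ethnic_groups.getD []
    let volunteer_list := volunteer_ethnic_groups.getD []
    -- {str(g).strip().lower() for g in l if g}
    let participant_set : PySem.Set String :=
      PySem.Set.ofList ((participant_list.filter (fun g => g != "")).map pvNorm)
    let volunteer_set : PySem.Set String :=
      PySem.Set.ofList ((volunteer_list.filter (fun g => g != "")).map pvNorm)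
    -- len(participant_set & volunteer_set) > 0
    decide (0 < PySem.Set.len (PySem.Set.inter participant_set volunteer_set))

-- ===== PORT B =====
-- the two-pointer while loop over the two sorted lists, as structural
-- recursion on the suffixes starting at i and j
def pvMergeScan : List String → List String → Bool
  | [], _ => false
  | _ :: _, [] => false
  | a :: as, b :: bs =>
    if a == b then true
    else if a < b then pvMergeScan as (b :: bs)
    else pvMergeScan (a :: as) bs
termination_by xs ys => xs.length + ys.length

-- _normalized_sorted: sorted(str(g).strip().lower() for g in lst if g)
def pvNormalizedSorted (groups : Option (List String)) : List String :=
  let lst := groups.getD []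
  PySem.List.sorted ((lst.filter (fun g => g != "")).map pvNorm) (fun x => x) false

def check_ethnic_group_overlap_py_alt (participant_ethnic_groups : Option (List String)) (volunteer_ethnic_groups : Option (List String)) : Bool :=
  if (participant_ethnic_groups.getD []).isEmpty || (volunteer_ethnic_groups.getD []).isEmpty then
    false
  else
    pvMergeScan (pvNormalizedSorted participant_ethnic_groups) (pvNormalizedSorted volunteer_ethnic_groups)

-- ===== PRECONDITION & SPEC =====
def Spec_check_ethnic_group_overlap_py (participant_ethnic_groups : Option (List String)) (volunteer_ethnic_groups : Option (List String)) (out : Bool) : Prop := out = check_ethnic_group_overlap_py_alt participant_ethnic_groups volunteer_ethnic_groups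
instance (participant_ethnic_groups : Option (List String)) (volunteer_ethnic_groups : Option (List String)) (out : Bool) : Decidable (Spec_check_ethnic_group_overlap_py participant_ethnic_groups volunteer_ethnic_groups out) := by unfold Spec_check_ethnic_group_overlap_py; infer_instance

-- ===== CLAIM =====
def Claim_equal_check_ethnic_group_overlap_py : Prop := ∀ (participant_ethnic_groups : Option (List String)) (volunteer_ethnic_groups : Option (List String)), Dom_check_ethnic_group_overlap_py participant_ethnic_groups volunteer_ethnic_groups → Spec_check_ethnic_group_overlap_py participant_ethnic_groups volunteer_ethnic_groups (check_ethnic_group_overlap_py participant_ethnic_groups volunteer_ethnic_groups)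

-- ===== LEMMAS AND PROOFS =====

-- A's nonempty set intersection says exactly "a common element exists"
theorem pv_interA (mp mv : List String) :
    decide (0 < PySem.Set.len (PySem.Set.inter (PySem.Set.ofList mp) (PySem.Set.ofList mv)))
    = decide (∃ x, x ∈ mp ∧ x ∈ mv) := by
  apply decide_eq_decide.mpr
  simp only [PySem.Set.len]
  rw [Int.natCast_pos, List.length_pos_iff_exists_mem]
  constructor
  · rintro ⟨x, hx⟩
    rw [PySem.Set.mem_inter, PySem.Set.mem_ofList, PySem.Set.mem_ofList] at hx
    exact ⟨x, hx⟩
  · rintro ⟨x, hx1, hx2⟩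
    exact ⟨x, by rw [PySem.Set.mem_inter, PySem.Set.mem_ofList, PySem.Set.mem_ofList]; exact ⟨hx1, hx2⟩⟩

-- on sorted lists, the merge scan says exactly "a common element exists"
theorem pvMergeScan_iff (xs : List String) :
    ∀ ys, xs.Pairwise (· ≤ ·) → ys.Pairwise (· ≤ ·) →
      (pvMergeScan xs ys = true ↔ ∃ x, x ∈ xs ∧ x ∈ ys) := by
  induction xs with
  | nil => intro ys _ _; simp [pvMergeScan]
  | cons a as iha =>
    intro ys hx
    induction ys with
    | nil => intro _; simp [pvMergeScan]
    | cons b bs ihb =>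
      intro hy
      by_cases hab : a = b
      · simp only [pvMergeScan, hab, beq_self_eq_true, if_true]
        exact ⟨fun _ => ⟨b, List.mem_cons_self .., List.mem_cons_self ..⟩, fun _ => trivial⟩
      · have hne : (a == b) = false := beq_eq_false_iff_ne.mpr hab
        by_cases hlt : a < b
        · rw [show pvMergeScan (a :: as) (b :: bs) = pvMergeScan as (b :: bs) by
            simp [pvMergeScan, hne, hlt]]
          rw [iha (b :: bs) (List.Pairwise.of_cons hx) hy]
          constructor
          · rintro ⟨x, hx1, hx2⟩; exact ⟨x, List.mem_cons_of_mem a hx1, hx2⟩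
          · rintro ⟨x, hx1, hx2⟩
            rcases List.mem_cons.mp hx1 with rfl | hx1'
            · exfalso
              rcases List.mem_cons.mp hx2 with rfl | hx2'
              · exact hab rfl
              · exact absurd ((List.pairwise_cons.mp hy).1 x hx2') (not_le.mpr hlt)
            · exact ⟨x, hx1', hx2⟩
        · have hba : b < a := lt_of_le_of_ne (not_lt.mp hlt) (fun h => hab h.symm)
          rw [show pvMergeScan (a :: as) (b :: bs) = pvMergeScan (a :: as) bs by
            simp [pvMergeScan, hne, hlt]]
          rw [ihb (List.Pairwise.of_cons hy)]
          constructor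
          · rintro ⟨x, hx1, hx2⟩; exact ⟨x, hx1, List.mem_cons_of_mem b hx2⟩
          · rintro ⟨x, hx1, hx2⟩
            rcases List.mem_cons.mp hx2 with rfl | hx2'
            · exfalso
              rcases List.mem_cons.mp hx1 with rfl | hx1'
              · exact hab rfl
              · exact absurd ((List.pairwise_cons.mp hx).1 x hx1') (not_le.mpr hba)
            · exact ⟨x, hx1, hx2'⟩

theorem pv_merge_eq_inter (mp mv : List String) :
    pvMergeScan (PySem.List.sorted mp (fun x => x) false) (PySem.List.sorted mv (fun x => x) false)
    = decide (∃ x, x ∈ mp ∧ x ∈ mv) := by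
  have hx := PySem.List.sorted_pairwise mp (fun x => x)
  have hy := PySem.List.sorted_pairwise mv (fun x => x)
  have h := pvMergeScan_iff (PySem.List.sorted mp (fun x => x) false)
    (PySem.List.sorted mv (fun x => x) false) hx hy
  simp only [PySem.List.mem_sorted] at h
  rcases hb : pvMergeScan (PySem.List.sorted mp (fun x => x) false) (PySem.List.sorted mv (fun x => x) false) with _ | _
  · symm; simp only [decide_eq_false_iff_not]
    intro hex; rw [← h] at hex; rw [hb] at hex; exact Bool.false_ne_true hex
  · symm; simp only [decide_eq_true_iff]
    exact h.mp hb

-- ===== VERDICT =====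
theorem check_ethnic_group_overlap_py_spec : Claim_equal_check_ethnic_group_overlap_py := by
  intro p v _
  unfold Spec_check_ethnic_group_overlap_py
  unfold check_ethnic_group_overlap_py check_ethnic_group_overlap_py_alt
  split
  · rfl
  · unfold pvNormalizedSorted
    rw [pv_interA, pv_merge_eq_inter]
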